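-- pv_equiv track=rewrite | github.com/ulsmallzhou/Dice | v1.2/dice-v1.2.py | iflegal_classic_dfunction
-- ===== SOURCE A (Python) =====
-- num_char = ['0', '1', '2', '3', '4', '5', '6', '7', '8', '9']
--
-- def iflegal_classic_dfunction(ipt: str):
--     '''纯数字+d表达式合法性审查'''
--     if len(ipt) == 0: return False              # 确保非空
--     for char in ipt:
--         if char not in (num_char + ['d']): return False # 确保均为数字或d
--     if 'd' not in ipt: return True              # 纯数字合法
--     first_d, d_num = ipt.find('d'), ipt.count('d')
--     for cid in range(d_num):
--         if ipt[cid + first_d] != 'd': return False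
--     return True
-- ===== SOURCE B (Python) =====
-- def iflegal_classic_dfunction(ipt: str):
--     '''Single forward scan in three phases: digits, then d-run, then digits.'''
--     if len(ipt) == 0:
--         return False
--     i, n = 0, len(ipt)
--     while i < n and ipt[i] in '0123456789':
--         i += 1
--     while i < n and ipt[i] == 'd':
--         i += 1
--     while i < n and ipt[i] in '0123456789':
--         i += 1
--     return i == n
-- ===== Notes on version B (the rewrite author's own statement) =====
-- stated objective: alternative
-- what changed: Replaces A's whole-string membership scan plus find/count plus an index loop over the d-run with a single three-phase pointer sweep (digits, then a run of 'd', then digits) that accepts iff the sweep consumes the whole string.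
import Mathlib
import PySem

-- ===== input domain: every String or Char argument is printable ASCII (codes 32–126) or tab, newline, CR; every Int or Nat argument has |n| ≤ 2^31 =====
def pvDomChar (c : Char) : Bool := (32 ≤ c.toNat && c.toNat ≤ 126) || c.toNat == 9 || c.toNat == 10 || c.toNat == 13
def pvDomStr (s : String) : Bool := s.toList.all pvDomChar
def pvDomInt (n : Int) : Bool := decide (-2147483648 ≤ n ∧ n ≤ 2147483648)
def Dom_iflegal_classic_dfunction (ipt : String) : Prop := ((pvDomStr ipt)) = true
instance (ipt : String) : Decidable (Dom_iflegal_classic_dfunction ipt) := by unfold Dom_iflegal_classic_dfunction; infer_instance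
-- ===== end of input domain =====

-- B replaces A's membership scan + find/count + index loop over the d-run by a single
-- three-phase sweep (digits, then a run of 'd', then digits) that accepts iff it
-- consumes the whole string; alternative algorithm, same O(n) cost.


-- ===== PORT A =====
-- A's module constant num_char
def pvNumCharA : List Char := ['0', '1', '2', '3', '4', '5', '6', '7', '8', '9']

def iflegal_classic_dfunction (ipt : String) : Bool :=
  let cs := ipt.toList
  if cs.length = 0 then false
  else if cs.all (fun c => (pvNumCharA ++ ['d']).contains c) then
    if PySem.Chars.isIn ['d'] cs then
      let first_d := PySem.Chars.find cs ['d']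
      let d_num := PySem.Chars.count cs ['d']
      -- 'for cid in range(d_num): if ipt[cid + first_d] != 'd': return False';
      -- on the paths that reach this loop the index is provably in range, so the
      -- 'none' (= IndexError) branch of pyGet? is unreachable
      (PySem.List.pyRange 0 (d_num : Int) 1).all (fun cid =>
        match PySem.List.pyGet? cs (cid + first_d) with
        | some c => c == 'd'
        | none => false)
    else true
  else false

-- ===== PORT B =====
-- the literal '0123456789' of Source B
def pvDigitsB : List Char := ['0', '1', '2', '3', '4', '5', '6', '7', '8', '9']

def pvIsDig (c : Char) : Bool := pvDigitsB.contains c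

-- each "while i < n and <test ipt[i]>: i += 1" advances the cursor exactly past the
-- matching prefix of the remaining suffix, i.e. is a dropWhile; "i == n" = nothing left
def iflegal_classic_dfunction_alt (ipt : String) : Bool :=
  let cs := ipt.toList
  if cs.isEmpty then false
  else (((cs.dropWhile pvIsDig).dropWhile (· == 'd')).dropWhile pvIsDig).isEmpty

-- ===== PRECONDITION & SPEC =====
def Spec_iflegal_classic_dfunction (ipt : String) (out : Bool) : Prop := out = iflegal_classic_dfunction_alt ipt
instance (ipt : String) (out : Bool) : Decidable (Spec_iflegal_classic_dfunction ipt out) := by unfold Spec_iflegal_classic_dfunction; infer_instance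

-- ===== CLAIM (what is proved, stated in full; the proofs are below) =====
def Claim_equal_iflegal_classic_dfunction : Prop := ∀ (ipt : String), Dom_iflegal_classic_dfunction ipt → Spec_iflegal_classic_dfunction ipt (iflegal_classic_dfunction ipt)

-- ===== LEMMAS AND PROOFS =====

-- "digit or 'd'": the character set both programs accept
def pvOk (c : Char) : Bool := pvIsDig c || c == 'd'

theorem pvIsDig_ne_d {c : Char} (h : pvIsDig c = true) : (c == 'd') = false := by
  have hm : c ∈ pvDigitsB := by simpa [pvIsDig, List.contains_iff_mem] using h
  fin_cases hm <;> rfl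

-- s.count('d') counts single-character occurrences, i.e. List.count
theorem count_go_singleton (l : List Char) (fuel acc : Nat) (h : l.length ≤ fuel) :
    PySem.Chars.count.go ['d'] fuel l acc = acc + l.count 'd' := by
  induction l generalizing fuel acc with
  | nil => cases fuel <;> simp [PySem.Chars.count.go]
  | cons c t ih =>
    cases fuel with
    | zero => simp at h
    | succ f =>
      simp only [PySem.Chars.count.go]
      by_cases hc : 'd' = c
      · subst hc
        simp [List.isPrefixOf, ih f (acc + 1) (by simpa using h)]
        omega
      · simp [List.isPrefixOf, hc, ih f acc (by simpa using h), Ne.symm hc]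

theorem count_d (cs : List Char) : PySem.Chars.count cs ['d'] = cs.count 'd' := by
  simpa using count_go_singleton cs cs.length 0 le_rfl

theorem prefix_singleton_iff (a : Char) (l : List Char) : ([a] <+: l) ↔ l.head? = some a := by
  cases l <;> simp [List.cons_prefix_iff]

theorem isIn_d_iff (cs : List Char) : PySem.Chars.isIn ['d'] cs = true ↔ 'd' ∈ cs := by
  rw [PySem.Chars.isIn_iff_infix, List.singleton_infix_iff]

-- s.find('d') is the length of the d-free prefix
theorem find_d (cs : List Char) (hd : 'd' ∈ cs) :
    PySem.Chars.find cs ['d'] = ((cs.takeWhile (fun c => !(c == 'd'))).length : Int) := by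
  set t1 := cs.takeWhile (fun c => !(c == 'd')) with ht1
  have hinf : (['d'] : List Char) <:+: cs := List.singleton_infix_iff .. |>.mpr hd
  have hnn : 0 ≤ PySem.Chars.find cs ['d'] := (PySem.Chars.find_nonneg_iff ..).mpr hinf
  obtain ⟨hpre, hmin⟩ := PySem.Chars.find_spec hnn
  have hsplit : t1 ++ cs.dropWhile (fun c => !(c == 'd')) = cs := List.takeWhile_append_dropWhile
  have hrne : cs.dropWhile (fun c => !(c == 'd')) ≠ [] := by
    intro hnil
    have := (List.dropWhile_eq_nil_iff ..).mp hnil 'd' hd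
    simp at this
  have hhead : (cs.dropWhile (fun c => !(c == 'd'))).head? = some 'd' := by
    have h1 := List.head_dropWhile_not (fun c => !(c == 'd')) hrne
    have h2 := List.head?_eq_some_head hrne
    simp at h1
    rw [h2, h1]
  have hat : (['d'] : List Char) <+: cs.drop t1.length := by
    rw [prefix_singleton_iff, List.head?_drop, ← hsplit]
    rw [List.getElem?_append_right (by omega)]
    simp only [Nat.sub_self, ← List.head?_eq_getElem?]
    exact hhead
  have hbefore : ∀ i < t1.length, ¬ (['d'] : List Char) <+: cs.drop i := by
    intro i hi hp
    rw [prefix_singleton_iff, List.head?_drop] at hp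
    have : cs[i]? = t1[i]? := by
      conv_lhs => rw [← hsplit]
      exact List.getElem?_append_left hi
    rw [this, List.getElem?_eq_getElem hi] at hp
    have hmem : t1[i] ∈ t1 := List.getElem_mem _
    have := List.mem_takeWhile_imp hmem
    simp_all
  have : (PySem.Chars.find cs ['d']).toNat = t1.length := by
    rcases lt_trichotomy (PySem.Chars.find cs ['d']).toNat t1.length with h | h | h
    · exact absurd hpre (hbefore _ h)
    · exact h
    · exact absurd hat (hmin _ h)
  omega

theorem dropWhile_congr' (p q : Char → Bool) (l : List Char) (h : ∀ x ∈ l, p x = q x) :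
    l.dropWhile p = l.dropWhile q := by
  induction l with
  | nil => rfl
  | cons c t ih =>
    simp only [List.dropWhile_cons]
    rw [h c (by simp)]
    split
    · exact ih (fun x hx => h x (by simp [hx]))
    · rfl

-- under all-ok, B's first digit-skip is exactly the skip-to-first-'d'
theorem dig_drop_eq (cs : List Char) (hok : ∀ c ∈ cs, pvOk c = true) :
    cs.dropWhile pvIsDig = cs.dropWhile (fun c => !(c == 'd')) := by
  apply dropWhile_congr'
  intro x hx
  have := hok x hx
  by_cases hdx : (x == 'd') = true
  · have : x = 'd' := by simpa using hdx
    subst this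
    simp [pvIsDig, pvDigitsB]
  · simp only [pvOk, Bool.or_eq_true] at this
    rcases this with h | h
    · simp [h, pvIsDig_ne_d h]
    · simp_all

-- B's sweep eats everything iff every char is ok and no 'd' survives past the first d-run
theorem chain_iff (cs : List Char) :
    ((((cs.dropWhile pvIsDig).dropWhile (· == 'd')).dropWhile pvIsDig) = []) ↔
      ((∀ c ∈ cs, pvOk c = true) ∧
        'd' ∉ (cs.dropWhile (fun c => !(c == 'd'))).dropWhile (fun c => c == 'd')) := by
  constructor
  · intro hnil
    have hok : ∀ c ∈ cs, pvOk c = true := by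
      intro c hc
      rw [← List.takeWhile_append_dropWhile (p := pvIsDig) (l := cs)] at hc
      rcases List.mem_append.mp hc with h1 | h1
      · simp [pvOk, List.mem_takeWhile_imp h1]
      · set X := cs.dropWhile pvIsDig
        rw [← List.takeWhile_append_dropWhile (p := (· == 'd')) (l := X)] at h1
        rcases List.mem_append.mp h1 with h2 | h2
        · simp [pvOk, List.mem_takeWhile_imp h2]
        · have := (List.dropWhile_eq_nil_iff ..).mp hnil _ h2
          simp [pvOk, this]
    refine ⟨hok, ?_⟩
    rw [← dig_drop_eq cs hok]
    intro hmem
    have : pvIsDig 'd' = true := (List.dropWhile_eq_nil_iff ..).mp hnil _ (by simpa using hmem)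
    simp [pvIsDig, pvDigitsB] at this
  · rintro ⟨hok, hnd⟩
    rw [dig_drop_eq cs hok]
    rw [List.dropWhile_eq_nil_iff]
    intro x hx
    have hxcs : x ∈ cs := by
      have h1 : x ∈ cs.dropWhile (fun c => !(c == 'd')) :=
        (List.dropWhile_sublist _).mem (by simpa using hx)
      exact (List.dropWhile_sublist _).mem h1
    have hxok := hok x hxcs
    have hxd : (x == 'd') = false := by
      by_cases h : (x == 'd') = true
      · have : x = 'd' := by simpa using h
        subst this
        exact absurd (by simpa using hx) hnd
      · simpa using h
    simpa [pvOk, hxd] using hxok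

-- A's contiguity loop passes iff no 'd' survives past the first d-run
theorem loop_iff (cs : List Char) (hd : 'd' ∈ cs) :
    ((PySem.List.pyRange 0 ((PySem.Chars.count cs ['d'] : Nat) : Int) 1).all (fun cid =>
        match PySem.List.pyGet? cs (cid + PySem.Chars.find cs ['d']) with
        | some c => c == 'd'
        | none => false) = true) ↔
      'd' ∉ (cs.dropWhile (fun c => !(c == 'd'))).dropWhile (fun c => c == 'd') := by
  set t1 := cs.takeWhile (fun c => !(c == 'd')) with ht1
  set r := cs.dropWhile (fun c => !(c == 'd')) with hr
  set t2 := r.takeWhile (fun c => c == 'd') with ht2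
  set y := r.dropWhile (fun c => c == 'd') with hy
  have hsplit2 : t2 ++ y = r := List.takeWhile_append_dropWhile
  have hsplit : t1 ++ (t2 ++ y) = cs := by rw [hsplit2]; exact List.takeWhile_append_dropWhile
  have ht1c : t1.count 'd' = 0 := by
    rw [List.count_eq_zero]
    intro hmem
    have := List.mem_takeWhile_imp hmem
    simp at this
  have ht2c : t2.count 'd' = t2.length := by
    rw [List.count_eq_length]
    intro b hb
    have hb' : b = 'd' := by simpa using List.mem_takeWhile_imp hb
    simp [hb']
  have hcnt : cs.count 'd' = t2.length + y.count 'd' := by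
    conv_lhs => rw [← hsplit]
    simp [List.count_append, ht1c, ht2c]
  have hfind := find_d cs hd
  rw [count_d, hcnt]
  have hbody : ∀ x : Int, 0 ≤ x →
      (match PySem.List.pyGet? cs (x + PySem.Chars.find cs ['d']) with
        | some c => c == 'd'
        | none => false) = (match (t2 ++ y)[x.toNat]? with
        | some c => c == 'd'
        | none => false) := by
    intro x hx
    rw [hfind]
    have hxe : x + (t1.length : Int) = ((x.toNat + t1.length : Nat) : Int) := by omega
    rw [hxe, PySem.List.pyGet?_natCast]
    conv_lhs => rw [← hsplit]
    rw [List.getElem?_append_right (by omega)]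
    rw [Nat.add_sub_cancel]
  rw [List.all_eq_true]
  constructor
  · intro hall hmem
    have hyc : 1 ≤ y.count 'd' := List.one_le_count_iff.mpr hmem
    have hx : ((t2.length : Int)) ∈ PySem.List.pyRange 0 ((t2.length + y.count 'd' : Nat) : Int) 1 := by
      rw [PySem.List.mem_pyRange_one]
      refine ⟨by positivity, by push_cast; omega⟩
    have := hall _ hx
    rw [hbody _ (by positivity)] at this
    have hyne : y ≠ [] := by intro h; rw [h] at hmem; simp at hmem
    rw [Int.toNat_natCast, List.getElem?_append_right le_rfl, Nat.sub_self,
        ← List.head?_eq_getElem?, List.head?_eq_some_head hyne] at this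
    have hh := List.head_dropWhile_not (fun c => c == 'd') (l := r) (by rw [← hy] at *; exact hyne)
    simp only [← hy] at hh
    simp [hh] at this
  · intro hnd x hx
    rw [PySem.List.mem_pyRange_one] at hx
    have hyc : y.count 'd' = 0 := List.count_eq_zero.mpr hnd
    rw [hbody _ hx.1]
    have hlt : x.toNat < t2.length := by
      have := hx.2
      rw [hyc] at this
      omega
    rw [List.getElem?_append_left hlt, List.getElem?_eq_getElem hlt]
    have := List.mem_takeWhile_imp (List.getElem_mem hlt)
    simpa using this

theorem okA_eq (c : Char) : (pvNumCharA ++ ['d']).contains c = pvOk c := by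
  rw [Bool.eq_iff_iff]
  simp [pvOk, pvIsDig, pvNumCharA, pvDigitsB]
  tauto

theorem core (cs : List Char) :
    (if cs.length = 0 then false
     else if cs.all (fun c => (pvNumCharA ++ ['d']).contains c) then
      if PySem.Chars.isIn ['d'] cs then
        (PySem.List.pyRange 0 ((PySem.Chars.count cs ['d'] : Nat) : Int) 1).all (fun cid =>
          match PySem.List.pyGet? cs (cid + PySem.Chars.find cs ['d']) with
          | some c => c == 'd'
          | none => false)
      else true
     else false) =
    (if cs.isEmpty then false
     else (((cs.dropWhile pvIsDig).dropWhile (· == 'd')).dropWhile pvIsDig).isEmpty) := by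
  by_cases hnil : cs = []
  · simp [hnil]
  · rw [if_neg (show ¬cs.length = 0 by simpa using hnil),
        if_neg (show ¬cs.isEmpty = true by simpa using hnil)]
    by_cases hok : ∀ c ∈ cs, pvOk c = true
    · rw [if_pos (by rw [List.all_eq_true]; intro c hc; rw [okA_eq]; exact hok c hc)]
      by_cases hd : 'd' ∈ cs
      · rw [if_pos ((isIn_d_iff cs).mpr hd), Bool.eq_iff_iff, List.isEmpty_iff, chain_iff,
            loop_iff cs hd]
        tauto
      · rw [if_neg (fun h => hd ((isIn_d_iff cs).mp h))]
        have hnd : 'd' ∉ (cs.dropWhile (fun c => !(c == 'd'))).dropWhile (fun c => c == 'd') := by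
          intro hmem
          exact hd ((List.dropWhile_sublist _).mem ((List.dropWhile_sublist _).mem hmem))
        rw [eq_comm, List.isEmpty_iff, chain_iff]
        exact ⟨hok, hnd⟩
    · rw [if_neg (show ¬(cs.all (fun c => (pvNumCharA ++ ['d']).contains c) = true) by
        rw [List.all_eq_true]
        intro h
        exact hok (fun c hc => by rw [← okA_eq]; exact h c hc))]
      rw [eq_comm, List.isEmpty_eq_false_iff]
      intro hchain
      exact hok ((chain_iff cs).mp hchain).1

-- ===== VERDICT (by name: the statement is the Claim_ definition above) =====
theorem iflegal_classic_dfunction_spec : Claim_equal_iflegal_classic_dfunction := by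
  intro ipt _
  unfold Spec_iflegal_classic_dfunction iflegal_classic_dfunction iflegal_classic_dfunction_alt
  exact core ipt.toList
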